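-- pv_equiv track=rewrite | github.com/Pharaon3/Art-Logic-Challenge | convert.py | encode
-- ===== SOURCE A (Python) =====
-- def encode(input_string):
--     """
--     Encodes a string into a list of integers by packing groups of four characters.
--
--     This function breaks the string into 4-character chunks, converts each chunk
--     to a 32-bit integer by bitwise packing of their ASCII values.
--
--     @param input_string: The text to be encoded.
--     @return: A list of integers representing the encoded version of the text.
--     """
--     packed_chunks = []  # Stores the 32-bit chunks formed from 4 characters
--     chunk = 0  # The current chunk being processed
--     bit_position = 0  # The current bit position within the chunk
--
--     # Loop through each character in the input string
--     for char in input_string: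
--         chunk |= ord(char) << bit_position  # Add the ASCII value to the current chunk
--         bit_position += 8  # Shift by 8 bits for the next character
--         if bit_position == 32:  # Once 4 characters (32 bits) are packed
--             packed_chunks.append(chunk)  # Store the packed chunk
--             chunk = 0  # Reset for the next chunk
--             bit_position = 0  # Reset the bit position for the next 32 bits
--
--     # If there are leftover characters, store them as a smaller chunk
--     if bit_position > 0:
--         packed_chunks.append(chunk)
--
--     # Convert packed chunks into a custom integer representation
--     encoded_output = []
--     for chunk in packed_chunks:
--         encoded_value = 0  # The transformed chunk
--         bit_index = 0  # Keeps track of the bit position in the encoded value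
--         while chunk > 0:
--             encoded_value |= (chunk & 1) << ((bit_index % 8) * 4 + (bit_index // 8))
--             chunk >>= 1
--             bit_index += 1
--         encoded_output.append(encoded_value)
--
--     return encoded_output
-- ===== SOURCE B (Python) =====
-- def encode(input_string):
--     """One-pass re-encoding: per 4-char group, scatter each character's bits
--     directly to their permuted positions, without forming the 32-bit chunk."""
--     encoded_output = []
--     for g in range(0, len(input_string), 4):
--         value = 0
--         for j, char in enumerate(input_string[g:g + 4]):
--             a = ord(char)
--             i = 0
--             while a > 0:
--                 value |= (a & 1) << (i * 4 + j)
--                 a >>= 1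
--                 i += 1
--         encoded_output.append(value)
--     return encoded_output
-- ===== Notes on version B (the rewrite author's own statement) =====
-- stated objective: alternative
-- what changed: B drops A's two-pass design (pack chars into 32-bit chunks, then bit-permute each chunk) and instead, per 4-char group, scatters each character's bits directly to their final permuted positions in a single pass, never forming the intermediate chunk or the packed_chunks list.
import Mathlib
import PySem

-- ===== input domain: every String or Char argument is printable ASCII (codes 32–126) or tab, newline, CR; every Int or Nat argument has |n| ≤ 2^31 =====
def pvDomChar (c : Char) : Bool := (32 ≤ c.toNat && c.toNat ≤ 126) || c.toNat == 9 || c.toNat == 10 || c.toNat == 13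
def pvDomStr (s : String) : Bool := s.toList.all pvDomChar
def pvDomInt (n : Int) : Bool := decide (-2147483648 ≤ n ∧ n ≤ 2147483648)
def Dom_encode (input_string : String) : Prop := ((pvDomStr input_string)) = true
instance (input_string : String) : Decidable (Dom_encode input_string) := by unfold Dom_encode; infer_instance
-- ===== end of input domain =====

-- B re-encodes each 4-char group in one pass (per-char bit scatter) instead of A's
-- pack-into-32-bit-chunks pass followed by a chunk bit-permutation pass; alternative decomposition.


-- ===== PORT A =====
-- one step of A's packing loop; state = (packed_chunks, chunk, bit_position).
-- all Python ints here are nonnegative, so they are carried as Nat and cast to Int at the end.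
def encPackStep (st : List Nat × Nat × Nat) (c : Char) : List Nat × Nat × Nat :=
  let chunk := st.2.1 ||| (c.toNat <<< st.2.2)
  let bit_position := st.2.2 + 8
  if bit_position = 32 then (st.1 ++ [chunk], 0, 0) else (st.1, chunk, bit_position)

-- A's second loop: while chunk > 0: encoded_value |= (chunk & 1) << ((bit_index % 8) * 4 + bit_index // 8); chunk >>= 1
def encPermute (chunk : Nat) (encoded_value : Nat) (bit_index : Nat) : Nat :=
  if h : chunk > 0 then
    encPermute (chunk >>> 1)
      (encoded_value ||| ((chunk &&& 1) <<< ((bit_index % 8) * 4 + bit_index / 8))) (bit_index + 1)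
  else encoded_value
termination_by chunk
decreasing_by simpa [Nat.shiftRight_one] using Nat.div_lt_self h one_lt_two

def encode (input_string : String) : List Int :=
  let st := input_string.toList.foldl encPackStep ([], 0, 0)
  let packed_chunks := if st.2.2 > 0 then st.1 ++ [st.2.1] else st.1
  packed_chunks.map (fun chunk => ((encPermute chunk 0 0 : Nat) : Int))

-- ===== PORT B =====
-- B's innermost loop: while a > 0: value |= (a & 1) << (i * 4 + j); a >>= 1; i += 1
def encCharBits (a : Nat) (j : Nat) (i : Nat) (value : Nat) : Nat :=
  if h : a > 0 then encCharBits (a >>> 1) j (i + 1) (value ||| ((a &&& 1) <<< (i * 4 + j)))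
  else value
termination_by a
decreasing_by simpa [Nat.shiftRight_one] using Nat.div_lt_self h one_lt_two

-- B's 'for j, char in enumerate(group)' with the running value
def encGroupLoop : List Char → Nat → Nat → Nat
  | [], _, value => value
  | c :: rest, j, value => encGroupLoop rest (j + 1) (encCharBits c.toNat j 0 value)

-- B's outer loop 'for g in range(0, len, 4)' over the remaining suffix
def encodeGroups (cs : List Char) : List Int :=
  match cs with
  | [] => []
  | c :: rest => ((encGroupLoop (List.take 4 (c :: rest)) 0 0 : Nat) : Int) :: encodeGroups (List.drop 4 (c :: rest))
termination_by cs.length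
decreasing_by simp

def encode_alt (input_string : String) : List Int :=
  encodeGroups input_string.toList

-- ===== PRECONDITION & SPEC =====
def Spec_encode (input_string : String) (out : List Int) : Prop := out = encode_alt input_string
instance (input_string : String) (out : List Int) : Decidable (Spec_encode input_string out) := by unfold Spec_encode; infer_instance

-- ===== CLAIM (what is proved, stated in full; the proofs are below) =====
def Claim_equal_encode : Prop := ∀ (input_string : String), Dom_encode input_string → Spec_encode input_string (encode input_string)

-- ===== LEMMAS AND PROOFS =====

-- canonical right-associated form of A's chunk-permutation loop
def spread (n : Nat) (bi : Nat) : Nat :=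
  if n = 0 then 0 else ((n % 2) <<< ((bi % 8) * 4 + bi / 8)) ||| spread (n / 2) (bi + 1)
termination_by n
decreasing_by exact Nat.div_lt_self (by omega) one_lt_two

-- canonical right-associated form of B's per-char bit loop
def spreadC (a : Nat) (j : Nat) (i : Nat) : Nat :=
  if a = 0 then 0 else ((a % 2) <<< (i * 4 + j)) ||| spreadC (a / 2) j (i + 1)
termination_by a
decreasing_by exact Nat.div_lt_self (by omega) one_lt_two

theorem spread_zero (bi : Nat) : spread 0 bi = 0 := by
  rw [spread]; simp

theorem spread_step (n bi : Nat) :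
    spread n bi = ((n % 2) <<< ((bi % 8) * 4 + bi / 8)) ||| spread (n / 2) (bi + 1) := by
  by_cases h : n = 0
  · subst h; simp [spread_zero]
  · conv_lhs => rw [spread]
    simp [h]

theorem spreadC_zero (j i : Nat) : spreadC 0 j i = 0 := by
  rw [spreadC]; simp

theorem spreadC_step (a j i : Nat) :
    spreadC a j i = ((a % 2) <<< (i * 4 + j)) ||| spreadC (a / 2) j (i + 1) := by
  by_cases h : a = 0
  · subst h; simp [spreadC_zero]
  · conv_lhs => rw [spreadC]
    simp [h]

theorem permute_spread (n : Nat) : ∀ ev bi, encPermute n ev bi = ev ||| spread n bi := by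
  induction n using Nat.strong_induction_on with
  | _ n IH =>
    intro ev bi
    rw [encPermute]
    by_cases h : n > 0
    · rw [dif_pos h, IH (n >>> 1) (by simpa [Nat.shiftRight_one] using Nat.div_lt_self h one_lt_two)]
      rw [Nat.shiftRight_one, Nat.and_one_is_mod, Nat.or_assoc, ← spread_step]
    · rw [dif_neg h]
      have hn : n = 0 := by omega
      subst hn
      simp [spread_zero]

theorem charBits_spreadC (a : Nat) : ∀ j i v, encCharBits a j i v = v ||| spreadC a j i := by
  induction a using Nat.strong_induction_on with
  | _ a IH =>
    intro j i v
    rw [encCharBits]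
    by_cases h : a > 0
    · rw [dif_pos h, IH (a >>> 1) (by simpa [Nat.shiftRight_one] using Nat.div_lt_self h one_lt_two)]
      rw [Nat.shiftRight_one, Nat.and_one_is_mod, Nat.or_assoc, ← spreadC_step]
    · rw [dif_neg h]
      have hn : a = 0 := by omega
      subst hn
      simp [spreadC_zero]

theorem spreadC_eq_spread (a : Nat) : ∀ j i, i ≤ 8 → a < 2 ^ (8 - i) → spreadC a j i = spread a (8 * j + i) := by
  induction a using Nat.strong_induction_on with
  | _ a IH =>
    intro j i hi ha
    by_cases h : a = 0
    · subst h; rw [spreadC_zero, spread_zero]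
    · have hilt : i < 8 := by
        by_contra hc
        have h8 : 8 - i = 0 := by omega
        rw [h8, pow_zero] at ha; omega
      have e : 2 ^ (8 - i) = 2 ^ (8 - (i + 1)) * 2 := by
        rw [← pow_succ]; congr 1; omega
      rw [e] at ha
      rw [spreadC_step, spread_step]
      have m8 : (8 * j + i) % 8 = i := by omega
      have d8 : (8 * j + i) / 8 = j := by omega
      rw [m8, d8]
      have e1 : 8 * j + i + 1 = 8 * j + (i + 1) := by omega
      rw [e1, ← IH (a / 2) (Nat.div_lt_self (by omega) one_lt_two) j (i + 1) (by omega) (by omega)]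

theorem spread_split (m : Nat) : ∀ a b bi, a < 2 ^ m →
    spread (a + b * 2 ^ m) bi = spread a bi ||| spread b (bi + m) := by
  induction m with
  | zero =>
    intro a b bi h
    rw [pow_zero] at h
    have ha : a = 0 := by omega
    subst ha
    simp [spread_zero]
  | succ m IH =>
    intro a b bi h
    have e : (2:Nat) ^ (m + 1) = 2 ^ m * 2 := pow_succ 2 m
    have h1 : (a + b * 2 ^ (m + 1)) % 2 = a % 2 := by
      rw [e, ← mul_assoc]; generalize b * 2 ^ m = q; omega
    have h2 : (a + b * 2 ^ (m + 1)) / 2 = a / 2 + b * 2 ^ m := by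
      rw [e, ← mul_assoc]; generalize b * 2 ^ m = q; omega
    rw [spread_step (a + b * 2 ^ (m + 1)) bi, h1, h2,
        IH (a / 2) b (bi + 1) (by rw [e] at h; omega),
        ← Nat.or_assoc, ← spread_step]
    have e2 : bi + 1 + m = bi + (m + 1) := by omega
    rw [e2]

theorem lor_add (m a b : Nat) (h : a < 2 ^ m) : a ||| (b <<< m) = a + b * 2 ^ m := by
  apply Nat.eq_of_testBit_eq
  intro k
  rw [Nat.testBit_lor, Nat.testBit_shiftLeft]
  have e : a + b * 2 ^ m = 2 ^ m * b + a := by ring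
  rw [e, Nat.testBit_two_pow_mul_add b h k]
  by_cases hk : k < m
  · rw [if_pos hk]
    have hnk : ¬ (k ≥ m) := by omega
    simp [hnk]
  · rw [if_neg hk]
    have hge : k ≥ m := by omega
    have hfalse : a.testBit k = false := by
      apply Nat.testBit_eq_false_of_lt
      exact lt_of_lt_of_le h (Nat.pow_le_pow_right (by norm_num) hge)
    simp [hfalse, hge]

-- A's result as a function of the character list
def encodeList (l : List Char) : List Int :=
  (if (l.foldl encPackStep ([], 0, 0)).2.2 > 0
   then (l.foldl encPackStep ([], 0, 0)).1 ++ [(l.foldl encPackStep ([], 0, 0)).2.1]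
   else (l.foldl encPackStep ([], 0, 0)).1).map (fun chunk => ((encPermute chunk 0 0 : Nat) : Int))

theorem encode_eq (s : String) : encode s = encodeList s.toList := rfl

theorem pack_acc (l : List Char) : ∀ (P : List Nat) (ch bp : Nat),
    l.foldl encPackStep (P, ch, bp)
      = (P ++ (l.foldl encPackStep ([], ch, bp)).1, (l.foldl encPackStep ([], ch, bp)).2) := by
  induction l with
  | nil => intro P ch bp; simp
  | cons c t IH =>
    intro P ch bp
    simp only [List.foldl_cons]
    by_cases h : bp + 8 = 32
    · rw [show encPackStep (P, ch, bp) c = (P ++ [ch ||| c.toNat <<< bp], 0, 0) from by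
            simp [encPackStep, h],
          show encPackStep ([], ch, bp) c = ([ch ||| c.toNat <<< bp], 0, 0) from by
            simp [encPackStep, h]]
      rw [IH (P ++ [ch ||| c.toNat <<< bp]) 0 0, IH [ch ||| c.toNat <<< bp] 0 0]
      simp
    · rw [show encPackStep (P, ch, bp) c = (P, ch ||| c.toNat <<< bp, bp + 8) from by
            simp [encPackStep, h],
          show encPackStep ([], ch, bp) c = ([], ch ||| c.toNat <<< bp, bp + 8) from by
            simp [encPackStep, h]]
      exact IH P _ _


theorem head1 (c0 : Nat) (h0 : c0 < 256) :
    encPermute c0 0 0 = encCharBits c0 0 0 0 := by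
  rw [permute_spread, charBits_spreadC,
      spreadC_eq_spread c0 0 0 (by omega) (by norm_num; omega)]

theorem head2 (c0 c1 : Nat) (h0 : c0 < 256) (h1 : c1 < 256) :
    encPermute (c0 ||| c1 <<< 8) 0 0 = encCharBits c1 1 0 (encCharBits c0 0 0 0) := by
  have e8 : (2:Nat) ^ 8 = 256 := by norm_num
  have l1 := lor_add 8 c0 c1 (by omega)
  rw [e8] at l1
  have s1 := spread_split 8 c0 c1 0 (by omega)
  rw [e8] at s1
  rw [permute_spread, l1, s1, charBits_spreadC, charBits_spreadC,
      spreadC_eq_spread c0 0 0 (by omega) (by norm_num; omega),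
      spreadC_eq_spread c1 1 0 (by omega) (by norm_num; omega)]
  norm_num [Nat.or_assoc]

theorem head3 (c0 c1 c2 : Nat) (h0 : c0 < 256) (h1 : c1 < 256) (h2 : c2 < 256) :
    encPermute ((c0 ||| c1 <<< 8) ||| c2 <<< 16) 0 0
      = encCharBits c2 2 0 (encCharBits c1 1 0 (encCharBits c0 0 0 0)) := by
  have e8 : (2:Nat) ^ 8 = 256 := by norm_num
  have e16 : (2:Nat) ^ 16 = 65536 := by norm_num
  have l1 := lor_add 8 c0 c1 (by omega)
  rw [e8] at l1
  have l2 := lor_add 16 (c0 + c1 * 256) c2 (by omega)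
  rw [e16] at l2
  have esum : c0 + c1 * 256 + c2 * 65536 = c0 + (c1 + c2 * 256) * 256 := by ring
  have s1 := spread_split 8 c0 (c1 + c2 * 256) 0 (by omega)
  rw [e8] at s1
  have s2 := spread_split 8 c1 c2 8 (by omega)
  rw [e8] at s2
  rw [permute_spread, l1, l2, esum, s1, s2, charBits_spreadC, charBits_spreadC, charBits_spreadC,
      spreadC_eq_spread c0 0 0 (by omega) (by norm_num; omega),
      spreadC_eq_spread c1 1 0 (by omega) (by norm_num; omega),
      spreadC_eq_spread c2 2 0 (by omega) (by norm_num; omega)]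
  norm_num [Nat.or_assoc]

theorem head4 (c0 c1 c2 c3 : Nat) (h0 : c0 < 256) (h1 : c1 < 256) (h2 : c2 < 256) (h3 : c3 < 256) :
    encPermute (((c0 ||| c1 <<< 8) ||| c2 <<< 16) ||| c3 <<< 24) 0 0
      = encCharBits c3 3 0 (encCharBits c2 2 0 (encCharBits c1 1 0 (encCharBits c0 0 0 0))) := by
  have e8 : (2:Nat) ^ 8 = 256 := by norm_num
  have e16 : (2:Nat) ^ 16 = 65536 := by norm_num
  have e24 : (2:Nat) ^ 24 = 16777216 := by norm_num
  have l1 := lor_add 8 c0 c1 (by omega)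
  rw [e8] at l1
  have l2 := lor_add 16 (c0 + c1 * 256) c2 (by omega)
  rw [e16] at l2
  have l3 := lor_add 24 (c0 + c1 * 256 + c2 * 65536) c3 (by omega)
  rw [e24] at l3
  have esum : c0 + c1 * 256 + c2 * 65536 + c3 * 16777216
      = c0 + (c1 + (c2 + c3 * 256) * 256) * 256 := by ring
  have s1 := spread_split 8 c0 (c1 + (c2 + c3 * 256) * 256) 0 (by omega)
  rw [e8] at s1
  have s2 := spread_split 8 c1 (c2 + c3 * 256) 8 (by omega)
  rw [e8] at s2
  have s3 := spread_split 8 c2 c3 16 (by omega)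
  rw [e8] at s3
  rw [permute_spread, l1, l2, l3, esum, s1, s2, s3,
      charBits_spreadC, charBits_spreadC, charBits_spreadC, charBits_spreadC,
      spreadC_eq_spread c0 0 0 (by omega) (by norm_num; omega),
      spreadC_eq_spread c1 1 0 (by omega) (by norm_num; omega),
      spreadC_eq_spread c2 2 0 (by omega) (by norm_num; omega),
      spreadC_eq_spread c3 3 0 (by omega) (by norm_num; omega)]
  norm_num [Nat.or_assoc]

theorem main_lemma (n : Nat) : ∀ (l : List Char), l.length ≤ n → (∀ c ∈ l, c.toNat < 256) →
    encodeList l = encodeGroups l := by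
  induction n with
  | zero =>
    intro l hl _
    match l with
    | [] => simp [encodeList, encodeGroups]
    | c :: t => simp at hl
  | succ n IH =>
    intro l hl hb
    match l with
    | [] => simp [encodeList, encodeGroups]
    | [c0] =>
      have b0 : c0.toNat < 256 := hb c0 (by simp)
      simp [encodeList, encodeGroups, encPackStep, encGroupLoop, head1 c0.toNat b0]
    | [c0, c1] =>
      have b0 : c0.toNat < 256 := hb c0 (by simp)
      have b1 : c1.toNat < 256 := hb c1 (by simp)
      simp [encodeList, encodeGroups, encPackStep, encGroupLoop, head2 c0.toNat c1.toNat b0 b1]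
    | [c0, c1, c2] =>
      have b0 : c0.toNat < 256 := hb c0 (by simp)
      have b1 : c1.toNat < 256 := hb c1 (by simp)
      have b2 : c2.toNat < 256 := hb c2 (by simp)
      simp [encodeList, encodeGroups, encPackStep, encGroupLoop,
            head3 c0.toNat c1.toNat c2.toNat b0 b1 b2]
    | c0 :: c1 :: c2 :: c3 :: rest =>
      have b0 : c0.toNat < 256 := hb c0 (by simp)
      have b1 : c1.toNat < 256 := hb c1 (by simp)
      have b2 : c2.toNat < 256 := hb c2 (by simp)
      have b3 : c3.toNat < 256 := hb c3 (by simp)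
      have hrest : ∀ c ∈ rest, c.toNat < 256 := fun c hc => hb c (by simp [hc])
      have hlen : rest.length ≤ n := by simp at hl; omega
      have tail := IH rest hlen hrest
      have step4 : (c0 :: c1 :: c2 :: c3 :: rest).foldl encPackStep ([], 0, 0)
          = rest.foldl encPackStep
              ([(((c0.toNat ||| c1.toNat <<< 8) ||| c2.toNat <<< 16) ||| c3.toNat <<< 24)], 0, 0) := by
        simp [encPackStep]
      have hgrp : encodeGroups (c0 :: c1 :: c2 :: c3 :: rest)
          = ((encGroupLoop [c0, c1, c2, c3] 0 0 : Nat) : Int) :: encodeGroups rest := by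
        rw [encodeGroups]; simp
      have hloop : encGroupLoop [c0, c1, c2, c3] 0 0
          = encCharBits c3.toNat 3 0 (encCharBits c2.toNat 2 0
              (encCharBits c1.toNat 1 0 (encCharBits c0.toNat 0 0 0))) := by
        simp [encGroupLoop]
      unfold encodeList at tail ⊢
      rw [step4, pack_acc rest _ 0 0, hgrp, hloop]
      by_cases hF : (rest.foldl encPackStep ([], 0, 0)).2.2 > 0
      · rw [if_pos hF] at tail ⊢
        simp only [List.cons_append, List.nil_append, List.map_cons]
        rw [tail, head4 c0.toNat c1.toNat c2.toNat c3.toNat b0 b1 b2 b3]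
      · rw [if_neg hF] at tail ⊢
        simp only [List.cons_append, List.nil_append, List.map_cons]
        rw [tail, head4 c0.toNat c1.toNat c2.toNat c3.toNat b0 b1 b2 b3]

-- ===== VERDICT (by name: the statement is the Claim_ definition above) =====
theorem encode_spec : Claim_equal_encode := by
  intro s hDom
  unfold Spec_encode
  rw [encode_eq]
  show encodeList s.toList = encodeGroups s.toList
  refine main_lemma s.toList.length s.toList le_rfl ?_
  intro c hc
  have := List.all_eq_true.mp hDom c hc
  simp [pvDomChar] at this
  omega
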